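-- pv_equiv track=rewrite | github.com/brammmieee/DWARL | utils/base_tools.py | create_level_dictionary
-- ===== SOURCE A (Python) =====
-- from typing import Tuple, List, Dict
--
-- def create_level_dictionary(input_list: List[int], num_levels: int, total_maps: int) -> Dict[str, List[int]]:
--     """
--     Organizes a list of map indices into a dictionary based on specified levels.
--
--     Args:
--     input_list (List[int]): The list of integers (map indices) to be organized.
--     num_levels (int): The number of levels to divide the maps into.
--     total_maps (int): The total number of maps.
--
--     Returns:
--     Dict[str, List[int]]: A dictionary where each key corresponds to a level ("lvl x") and each value is a list of integers assigned to that level.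
--     """
--     level_dict = {}
--     maps_per_level = total_maps // num_levels  # Assumes an equal distribution of maps across levels
--     for i in range(1, num_levels + 1):
--         lower_bound = (i - 1) * maps_per_level
--         if i < num_levels:
--             upper_bound = i * maps_per_level
--         else:
--             upper_bound = total_maps  # Ensure the last level includes any remaining maps due to integer division
--
--         level_key = f'lvl {i}'
--         level_values = [num for num in input_list if lower_bound <= num < upper_bound]
--         level_dict[level_key] = level_values
--
--     return level_dict
-- ===== SOURCE B (Python) =====
-- from typing import List, Dict
--
-- def create_level_dictionary(input_list: List[int], num_levels: int, total_maps: int) -> Dict[str, List[int]]: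
--     maps_per_level = total_maps // num_levels
--     n = num_levels
--     buckets = [[] for _ in range(n)]
--     if n >= 1:
--         for num in input_list:
--             # middle levels 1..n-1 cover [(i-1)*m, i*m): bucket index is num // m
--             if maps_per_level > 0 and 0 <= num < (n - 1) * maps_per_level:
--                 buckets[num // maps_per_level].append(num)
--             # last level covers [(n-1)*m, total_maps)
--             if (n - 1) * maps_per_level <= num < total_maps:
--                 buckets[n - 1].append(num)
--     return {f'lvl {i + 1}': buckets[i] for i in range(n)}
-- ===== Notes on version B (the rewrite author's own statement) =====
-- stated objective: faster
-- what changed: Replaces the per-level rescan of the whole input (one filter pass per level) by a single pass that sends each number straight to its bucket via num // maps_per_level, with the last bucket handling the [ (n-1)*m, total_maps ) remainder.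
import Mathlib
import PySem

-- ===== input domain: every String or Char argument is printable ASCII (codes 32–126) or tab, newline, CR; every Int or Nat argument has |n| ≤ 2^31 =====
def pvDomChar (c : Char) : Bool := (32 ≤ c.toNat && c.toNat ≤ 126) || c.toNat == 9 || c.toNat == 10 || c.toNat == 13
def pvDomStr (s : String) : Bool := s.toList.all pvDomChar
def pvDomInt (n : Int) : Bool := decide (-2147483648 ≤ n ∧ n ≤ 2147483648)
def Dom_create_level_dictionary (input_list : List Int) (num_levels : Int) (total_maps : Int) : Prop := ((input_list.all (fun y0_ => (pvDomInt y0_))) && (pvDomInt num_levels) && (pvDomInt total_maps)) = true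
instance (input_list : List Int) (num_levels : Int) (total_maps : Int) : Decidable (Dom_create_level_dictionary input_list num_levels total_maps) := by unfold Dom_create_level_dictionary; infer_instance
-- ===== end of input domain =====

-- B replaces A's per-level rescan of input_list by a single pass that sends each
-- number directly to its bucket via floor division (asymptotically faster).


-- ===== PORT A =====
-- literal port of A: for each level i in 1..num_levels, rescan input_list with the
-- level's bounds and insert the filtered list under key "lvl i"; return the dict's items.
def create_level_dictionary (input_list : List Int) (num_levels : Int) (total_maps : Int) : List (String × List Int) :=
  let maps_per_level := PySem.Int.floordiv total_maps num_levels
  let level_dict :=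
    (PySem.List.pyRange 1 (num_levels + 1) 1).foldl (fun d i =>
      let lower_bound := (i - 1) * maps_per_level
      let upper_bound := if i < num_levels then i * maps_per_level else total_maps
      let level_key := "lvl " ++ PySem.Int.toStr i
      let level_values := input_list.filter (fun num => decide (lower_bound ≤ num ∧ num < upper_bound))
      d.insert level_key level_values)
      (PySem.Dict.empty : PySem.Dict String (List Int))
  level_dict.items

-- ===== PORT B =====
-- one step of Source B's single pass: route num to its middle bucket (index num // m)
-- and/or to the last bucket
def pvAltStep (num_levels maps_per_level total_maps : Int) (buckets : List (List Int)) (num : Int) : List (List Int) :=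
  let b1 :=
    if 0 < maps_per_level ∧ 0 ≤ num ∧ num < (num_levels - 1) * maps_per_level then
      let j := (PySem.Int.floordiv num maps_per_level).toNat
      buckets.set j (PySem.List.pyGetD buckets (PySem.Int.floordiv num maps_per_level) [] ++ [num])
    else buckets
  if (num_levels - 1) * maps_per_level ≤ num ∧ num < total_maps then
    b1.set (num_levels - 1).toNat (PySem.List.pyGetD b1 (num_levels - 1) [] ++ [num])
  else b1

def create_level_dictionary_alt (input_list : List Int) (num_levels : Int) (total_maps : Int) : List (String × List Int) :=
  let maps_per_level := PySem.Int.floordiv total_maps num_levels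
  let init := (PySem.List.pyRange 0 num_levels 1).map (fun _ => ([] : List Int))
  let buckets :=
    if 1 ≤ num_levels then
      input_list.foldl (pvAltStep num_levels maps_per_level total_maps) init
    else init
  (PySem.List.pyRange 0 num_levels 1).map (fun i =>
    ("lvl " ++ PySem.Int.toStr (i + 1), PySem.List.pyGetD buckets i []))

-- ===== PRECONDITION & SPEC =====
-- Pre_ excludes exactly num_levels = 0, where A raises ZeroDivisionError.
def Pre_create_level_dictionary (input_list : List Int) (num_levels : Int) (total_maps : Int) : Prop := num_levels ≠ 0
instance (input_list : List Int) (num_levels : Int) (total_maps : Int) : Decidable (Pre_create_level_dictionary input_list num_levels total_maps) := by unfold Pre_create_level_dictionary; infer_instance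
def pvWitness_create_level_dictionary : List Int × Int × Int := ([0, 1, 5, 7, 3, -2, 8], 2, 8)

def Spec_create_level_dictionary (input_list : List Int) (num_levels : Int) (total_maps : Int) (out : List (String × List Int)) : Prop := out = create_level_dictionary_alt input_list num_levels total_maps
instance (input_list : List Int) (num_levels : Int) (total_maps : Int) (out : List (String × List Int)) : Decidable (Spec_create_level_dictionary input_list num_levels total_maps out) := by unfold Spec_create_level_dictionary; infer_instance

-- ===== CLAIM (what is proved, stated in full; the proofs are below) =====
def Claim_equal_create_level_dictionary : Prop := ∀ (input_list : List Int) (num_levels : Int) (total_maps : Int), Dom_create_level_dictionary input_list num_levels total_maps → Pre_create_level_dictionary input_list num_levels total_maps → Spec_create_level_dictionary input_list num_levels total_maps (create_level_dictionary input_list num_levels total_maps)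

-- ===== LEMMAS AND PROOFS =====

-- decimal-digit list of a Nat (msd first), mirrors Nat.toDigitsCore's structure
def pvDigits (n : Nat) : List Char :=
  if h : n / 10 = 0 then [Nat.digitChar (n % 10)]
  else pvDigits (n / 10) ++ [Nat.digitChar (n % 10)]
decreasing_by omega

lemma pvDigits_eq (n : Nat) : pvDigits n =
    if n / 10 = 0 then [Nat.digitChar (n % 10)]
    else pvDigits (n / 10) ++ [Nat.digitChar (n % 10)] := by
  rw [pvDigits]; split <;> simp_all

lemma pvToDigitsCore_eq : ∀ (fuel n : Nat) (ds : List Char), n < fuel →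
    Nat.toDigitsCore 10 fuel n ds = pvDigits n ++ ds := by
  intro fuel
  induction fuel with
  | zero => intro n ds h; omega
  | succ f ih =>
    intro n ds h
    rw [Nat.toDigitsCore, pvDigits_eq]
    by_cases h0 : n / 10 = 0
    · simp [h0]
    · simp only [h0]
      rw [ih (n / 10) _ (by omega)]
      simp

lemma pvDigits_ne_nil (n : Nat) : pvDigits n ≠ [] := by
  rw [pvDigits_eq]; split <;> simp

lemma pvDigitChar_inj : ∀ x < 10, ∀ y < 10, Nat.digitChar x = Nat.digitChar y → x = y := by decide

lemma pvDigits_inj : ∀ a b : Nat, pvDigits a = pvDigits b → a = b := by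
  intro a
  induction a using Nat.strong_induction_on with
  | _ a ih =>
    intro b h
    rw [pvDigits_eq a, pvDigits_eq b] at h
    by_cases ha : a / 10 = 0 <;> by_cases hb : b / 10 = 0
    · rw [if_pos ha, if_pos hb] at h
      have := pvDigitChar_inj (a % 10) (by omega) (b % 10) (by omega) (by simpa using h)
      omega
    · rw [if_pos ha, if_neg hb] at h
      have hlen := congrArg List.length h
      cases hbd : pvDigits (b / 10) with
      | nil => exact absurd hbd (pvDigits_ne_nil (b / 10))
      | cons x xs => rw [hbd] at hlen; simp at hlen
    · rw [if_neg ha, if_pos hb] at h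
      have hlen := congrArg List.length h
      cases had : pvDigits (a / 10) with
      | nil => exact absurd had (pvDigits_ne_nil (a / 10))
      | cons x xs => rw [had] at hlen; simp at hlen
    · rw [if_neg ha, if_neg hb] at h
      have h2 := List.append_inj' h rfl
      have := pvDigitChar_inj (a % 10) (by omega) (b % 10) (by omega) (by simpa using h2.2)
      have := ih (a / 10) (by omega) (b / 10) h2.1
      omega

lemma pvToChars_inj_pos (a b : Int) (ha : 0 < a) (hb : 0 < b)
    (h : PySem.Int.toChars a = PySem.Int.toChars b) : a = b := by
  unfold PySem.Int.toChars at h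
  rw [if_neg (by omega), if_neg (by omega)] at h
  unfold Nat.toDigits at h
  rw [pvToDigitsCore_eq _ _ _ (by omega), pvToDigitsCore_eq _ _ _ (by omega)] at h
  simp at h
  have := pvDigits_inj _ _ h
  omega

lemma pvKey_inj_pos (a b : Int) (ha : 0 < a) (hb : 0 < b)
    (h : ("lvl " ++ PySem.Int.toStr a) = ("lvl " ++ PySem.Int.toStr b)) : a = b := by
  apply pvToChars_inj_pos a b ha hb
  have := congrArg String.toList h
  simp [PySem.Int.toList_toStr] at this
  exact this

-- A's per-level predicate at level i
def pvPred (n m t i : Int) (num : Int) : Bool :=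
  decide ((i - 1) * m ≤ num ∧ num < (if i < n then i * m else t))

-- middle-level bounds force a positive maps_per_level and pin the floor quotient
lemma pvMidBound (n m : Int) (j : Nat) (hjn : (j : Int) + 1 < n) (num : Int)
    (hb : (j : Int) * m ≤ num ∧ num < ((j : Int) + 1) * m) :
    0 < m ∧ 0 ≤ num ∧ num < (n - 1) * m ∧ PySem.Int.floordiv num m = (j : Int) := by
  obtain ⟨h1, h2⟩ := hb
  have hd : ((j : Int) + 1) * m = (j : Int) * m + m := by ring
  have hm : 0 < m := by nlinarith
  have h0 : (0 : Int) ≤ (j : Int) * m := mul_nonneg (by positivity) hm.le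
  have h3 : ((j : Int) + 1) * m ≤ (n - 1) * m :=
    mul_le_mul_of_nonneg_right (by omega) hm.le
  refine ⟨hm, by omega, by omega, ?_⟩
  rw [PySem.Int.floordiv_eq_iff_of_pos hm]
  exact ⟨h1, h2⟩

lemma pvAltStep_length (n m t : Int) (buckets : List (List Int)) (num : Int) :
    (pvAltStep n m t buckets num).length = buckets.length := by
  unfold pvAltStep
  split_ifs <;> simp

-- one step of the single pass appends num to bucket j exactly when A's level-(j+1) test holds
lemma pvAltStep_getD (n m t : Int) (hn : 1 ≤ n) (buckets : List (List Int))
    (hlen : buckets.length = n.toNat) (j : Nat) (hj : j < n.toNat) (num : Int) :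
    PySem.List.pyGetD (pvAltStep n m t buckets num) (j : Int) [] =
      PySem.List.pyGetD buckets (j : Int) [] ++
        (if pvPred n m t ((j : Int) + 1) num then [num] else []) := by
  have hgj : ∀ (l : List (List Int)), PySem.List.pyGetD l (j : Int) [] = l.getD j [] := by
    intro l
    rw [PySem.List.pyGetD_of_nonneg l [] (by positivity)]
    simp
  unfold pvAltStep pvPred
  simp only [show ((j : Int) + 1 - 1) = (j : Int) from by ring]
  by_cases hmid : 0 < m ∧ 0 ≤ num ∧ num < (n - 1) * m
  · have hq0 : (0 : Int) ≤ PySem.Int.floordiv num m := by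
      rw [PySem.Int.le_floordiv_iff_mul_le hmid.1]
      simpa using hmid.2.1
    have hqlt : PySem.Int.floordiv num m < n - 1 := by
      rw [PySem.Int.floordiv_lt_iff_lt_mul hmid.1]
      exact hmid.2.2
    have hlast : ¬ ((n - 1) * m ≤ num ∧ num < t) := by
      intro h; exact absurd hmid.2.2 (by omega)
    rw [if_pos hmid, if_neg hlast]
    set q := PySem.Int.floordiv num m with hqdef
    by_cases hjq : j = q.toNat
    · have hqj : q = (j : Int) := by omega
      rw [hgj, hgj, ← hjq, List.getD_eq_getElem?_getD, List.getElem?_set_self (by omega)]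
      rw [hqj, hgj]
      have hfd : (j : Int) * m ≤ num ∧ num < ((j : Int) + 1) * m :=
        (PySem.Int.floordiv_eq_iff_of_pos hmid.1).mp (hqj ▸ hqdef.symm)
      rw [if_pos (by rw [if_pos (by omega)]; simpa using hfd)]
      simp
    · rw [hgj, hgj, List.getD_eq_getElem?_getD, List.getElem?_set_ne (by omega),
        ← List.getD_eq_getElem?_getD]
      have hcond : ¬ ((j : Int) * m ≤ num ∧
          num < (if (j : Int) + 1 < n then ((j : Int) + 1) * m else t)) := by
        intro hb
        by_cases hjn : (j : Int) + 1 < n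
        · rw [if_pos hjn] at hb
          have hh := pvMidBound n m j hjn num hb
          omega
        · rw [if_neg hjn] at hb
          have : (n - 1) * m ≤ num := by
            have := hb.1
            rw [show (j : Int) = n - 1 from by omega] at this
            exact this
          exact absurd hmid.2.2 (by omega)
      rw [if_neg (by simpa using hcond)]
      simp
  · rw [if_neg hmid]
    by_cases hlast : (n - 1) * m ≤ num ∧ num < t
    · rw [if_pos hlast]
      by_cases hje : (j : Int) = n - 1
      · have hjt : (n - 1).toNat = j := by omega
        rw [hgj, hjt, hgj, List.getD_eq_getElem?_getD, List.getElem?_set_self (by omega)]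
        rw [show (n - 1 : Int) = (j : Int) from hje.symm, hgj]
        rw [if_pos (by rw [if_neg (by omega)]; rw [hje]; simpa using hlast)]
        simp
      · rw [hgj, hgj, List.getD_eq_getElem?_getD, List.getElem?_set_ne (by omega),
          ← List.getD_eq_getElem?_getD]
        have hjn : (j : Int) + 1 < n := by omega
        have hcond : ¬ ((j : Int) * m ≤ num ∧
            num < (if (j : Int) + 1 < n then ((j : Int) + 1) * m else t)) := by
          intro hb
          rw [if_pos hjn] at hb
          have hh := pvMidBound n m j hjn num hb
          exact hmid ⟨hh.1, hh.2.1, hh.2.2.1⟩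
        rw [if_neg (by simpa using hcond)]
        simp
    · rw [if_neg hlast]
      have hcond : ¬ ((j : Int) * m ≤ num ∧
          num < (if (j : Int) + 1 < n then ((j : Int) + 1) * m else t)) := by
        intro hb
        by_cases hjn : (j : Int) + 1 < n
        · rw [if_pos hjn] at hb
          have hh := pvMidBound n m j hjn num hb
          exact hmid ⟨hh.1, hh.2.1, hh.2.2.1⟩
        · rw [if_neg hjn] at hb
          refine hlast ⟨?_, hb.2⟩
          have := hb.1
          rw [show (j : Int) = n - 1 from by omega] at this
          exact this
      rw [if_neg (by simpa using hcond)]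
      simp

-- the whole single pass leaves in bucket j exactly the elements passing A's level-(j+1) test
lemma pvFold_getD (n m t : Int) (hn : 1 ≤ n) :
    ∀ (xs : List Int) (buckets : List (List Int)), buckets.length = n.toNat →
    ∀ j : Nat, j < n.toNat →
    PySem.List.pyGetD (xs.foldl (pvAltStep n m t) buckets) (j : Int) [] =
      PySem.List.pyGetD buckets (j : Int) [] ++
        xs.filter (fun num => pvPred n m t ((j : Int) + 1) num) := by
  intro xs
  induction xs with
  | nil => intro buckets _ j _; simp
  | cons x xs ih =>
    intro buckets hlen j hj
    simp only [List.foldl_cons, List.filter_cons]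
    rw [ih _ (by rw [pvAltStep_length]; exact hlen) j hj,
      pvAltStep_getD n m t hn buckets hlen j hj x]
    by_cases hp : pvPred n m t ((j : Int) + 1) x
    · simp [hp]
    · simp [hp]

-- A's dict-building fold over the fresh, pairwise-distinct keys "lvl i" appends its items in order
lemma pvA_items (xs : List Int) (n t : Int) :
    create_level_dictionary xs n t =
      (PySem.List.pyRange 1 (n + 1) 1).map (fun i =>
        ("lvl " ++ PySem.Int.toStr i,
         xs.filter (fun num => pvPred n (PySem.Int.floordiv t n) t i num))) := by
  unfold create_level_dictionary
  show ((PySem.List.pyRange 1 (n + 1) 1).foldl (fun d i =>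
      d.insert ("lvl " ++ PySem.Int.toStr i)
        (xs.filter (fun num => pvPred n (PySem.Int.floordiv t n) t i num)))
      (PySem.Dict.empty : PySem.Dict String (List Int))).items = _
  rw [PySem.Dict.items_foldl_insert_fresh (PySem.List.pyRange 1 (n + 1) 1)
    (fun i => "lvl " ++ PySem.Int.toStr i)
    (fun i => xs.filter (fun num => pvPred n (PySem.Int.floordiv t n) t i num))
    PySem.Dict.empty ?_ ?_]
  · simp [show (PySem.Dict.empty : PySem.Dict String (List Int)).items = [] from rfl]
  · intro a _
    exact PySem.Dict.contains_empty _
  · apply List.Nodup.map_on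
    · intro a ha b hb h
      rw [PySem.List.mem_pyRange_one] at ha hb
      exact pvKey_inj_pos a b (by omega) (by omega) h
    · exact PySem.List.nodup_pyRange_one 1 (n + 1)

-- ===== VERDICT (by name: the statement is the Claim_ definition above) =====
theorem create_level_dictionary_spec : Claim_equal_create_level_dictionary := by
  intro xs n t hdom hpre
  unfold Spec_create_level_dictionary create_level_dictionary_alt
  rw [pvA_items]
  rw [PySem.List.pyRange_one 1 (n + 1), PySem.List.pyRange_one 0 n]
  simp only [List.map_map, zero_add,
    show n + 1 - 1 = n from by ring, show n - 0 = n from by ring]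
  apply List.map_congr_left
  intro k hk
  rw [List.mem_range] at hk
  simp only [Function.comp_apply]
  rw [Prod.mk.injEq]
  refine ⟨by rw [show (1 : Int) + (k : Int) = (k : Int) + 1 from by ring], ?_⟩
  have hn : 1 ≤ n := by
    by_contra hn1
    unfold Pre_create_level_dictionary at hpre
    have : n ≤ -1 := by omega
    omega
  rw [if_pos hn]
  rw [pvFold_getD n (PySem.Int.floordiv t n) t hn xs _ (by simp) k hk]
  rw [PySem.List.pyGetD_of_nonneg _ _ (by positivity)]
  simp only [Int.toNat_natCast, List.getD_eq_getElem?_getD, List.getElem?_map,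
    List.getElem?_range, hk]
  simp only [show (1 : Int) + (k : Int) = (k : Int) + 1 from by ring]
  simp
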